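-- pv_equiv track=rewrite | github.com/vanschependom/KULAK_beginselen-van-programmeren | OZ7/modeloplossing/oef_1_3.py | genereerZinnenZonderDubbels
-- ===== SOURCE A (Python) =====
-- def genereerZinnenZonderDubbels(woordenDict, zinSkelet):
--     '''
--         Genereert zinnen volgens een gegeven skelet met woorden uit een gegeven dictionary
--     Parameters
--     ----------
--     woordenDict: dict
--         Dictionary waarbij de keys de woorden zijn met de values de functie
--     zinSkelet: list
--         Geeft de structuur van de te genereren zinnen
--     Returns
--     -------
--     list:
--         Lijst van alle gegenereerde zinnen die voldoen aan de structuur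
--     '''
--     # Triviaal geval: een leeg skelet, oftewel een lege lijst.
--     if zinSkelet == []:
--         return ["."]  # Laatste karakter van de zin: het leesteken
--     else:
--         # Verklein probleem: genereer alle zinnen voor een kleiner zinSkelet
--         kleinerZinSkelet = zinSkelet[1:]
--         alleZinnenVoorKleinerSkelet = genereerZinnenZonderDubbels(woordenDict, kleinerZinSkelet)
--
--         # Samenvoegen: alle mogelijkheden voor het volledig skelet maken
--         resultaat = []
--         woordsoort = zinSkelet[0]  # gevraagde woordsoort voor de huidige locatie
--         for key in woordenDict.keys():
--             if woordenDict[key] == woordsoort: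
--                 for zin in alleZinnenVoorKleinerSkelet:
--                     if key not in zin: # als de key al niet in de zin zit:
--                         resultaat.append(key + " " + zin)  # Zin uitbreiden met nieuwe woord
--                         # en toevoegen aan resultaat
--
--         return resultaat
-- ===== SOURCE B (Python) =====
-- def genereerZinnenZonderDubbels(woordenDict, zinSkelet):
--     # Iterative version: build the sentence list back-to-front over the skeleton.
--     resultaat = ["."]
--     for woordsoort in reversed(zinSkelet):
--         resultaat = [woord + " " + zin
--                      for woord, soort in woordenDict.items() if soort == woordsoort
--                      for zin in resultaat
--                      if woord not in zin]
--     return resultaat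
-- ===== Notes on version B (the rewrite author's own statement) =====
-- stated objective: simpler
-- what changed: Replaces the recursion on the skeleton by an iterative loop over the reversed skeleton that rebuilds the sentence list with one nested comprehension over dict items, eliminating the recursive calls and the explicit key lookup inside the loop.
import Mathlib
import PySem

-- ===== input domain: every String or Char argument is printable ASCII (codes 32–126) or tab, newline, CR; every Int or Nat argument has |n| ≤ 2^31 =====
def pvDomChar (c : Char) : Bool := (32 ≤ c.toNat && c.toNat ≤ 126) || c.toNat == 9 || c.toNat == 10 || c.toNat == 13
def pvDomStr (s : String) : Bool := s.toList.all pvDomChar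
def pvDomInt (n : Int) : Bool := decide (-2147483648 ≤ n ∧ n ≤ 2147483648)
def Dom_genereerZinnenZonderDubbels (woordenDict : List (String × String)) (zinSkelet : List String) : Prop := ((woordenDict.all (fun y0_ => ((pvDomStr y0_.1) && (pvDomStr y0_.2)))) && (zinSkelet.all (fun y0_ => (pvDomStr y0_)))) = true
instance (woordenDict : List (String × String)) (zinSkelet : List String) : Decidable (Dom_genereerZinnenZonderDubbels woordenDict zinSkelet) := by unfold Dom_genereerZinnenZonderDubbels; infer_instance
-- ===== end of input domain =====

-- ===== PORT A =====
-- Literal port of A: recursion on zinSkelet; for each dict key whose value is the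
-- required word kind, append key ++ " " ++ zin for every shorter sentence not containing key.
def genereerZinnenZonderDubbels (woordenDict : List (String × String)) (zinSkelet : List String) : List String :=
  match zinSkelet with
  | [] => ["."]
  | woordsoort :: kleinerZinSkelet =>
    let alleZinnen := genereerZinnenZonderDubbels woordenDict kleinerZinSkelet
    let d := PySem.Dict.ofList woordenDict
    d.keys.foldl (fun resultaat key =>
      if d.getD key "" == woordsoort then
        alleZinnen.foldl (fun resultaat zin =>
          if !PySem.Str.isIn key zin then resultaat ++ [key ++ " " ++ zin] else resultaat)
          resultaat
      else resultaat) []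

-- ===== PORT B =====
-- Literal port of B: fold over the reversed skeleton, one comprehension per slot.
def genereerZinnenZonderDubbels_alt (woordenDict : List (String × String)) (zinSkelet : List String) : List String :=
  let d := PySem.Dict.ofList woordenDict
  zinSkelet.reverse.foldl (fun resultaat woordsoort =>
    (d.items.filter (fun p => p.2 == woordsoort)).flatMap (fun p =>
      (resultaat.filter (fun zin => !PySem.Str.isIn p.1 zin)).map
        (fun zin => p.1 ++ " " ++ zin))) ["."]

-- ===== PRECONDITION & SPEC =====
def Spec_genereerZinnenZonderDubbels (woordenDict : List (String × String)) (zinSkelet : List String) (out : List String) : Prop := out = genereerZinnenZonderDubbels_alt woordenDict zinSkelet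
instance (woordenDict : List (String × String)) (zinSkelet : List String) (out : List String) : Decidable (Spec_genereerZinnenZonderDubbels woordenDict zinSkelet out) := by unfold Spec_genereerZinnenZonderDubbels; infer_instance

-- ===== CLAIM (what is proved, stated in full; the proofs are below) =====
def Claim_equal_genereerZinnenZonderDubbels : Prop := ∀ (woordenDict : List (String × String)) (zinSkelet : List String), Dom_genereerZinnenZonderDubbels woordenDict zinSkelet → Spec_genereerZinnenZonderDubbels woordenDict zinSkelet (genereerZinnenZonderDubbels woordenDict zinSkelet)

-- ===== LEMMAS AND PROOFS =====

-- B's per-slot step, named for the proofs.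
def pvStepB (d : PySem.Dict String String) (resultaat : List String) (woordsoort : String) : List String :=
  (d.items.filter (fun p => p.2 == woordsoort)).flatMap (fun p =>
    (resultaat.filter (fun zin => !PySem.Str.isIn p.1 zin)).map
      (fun zin => p.1 ++ " " ++ zin))

theorem pvFlatMap_if (ks : List String) (val : String → String) (ws : String)
    (G : String → List String) :
    ((ks.map (fun k => (k, val k))).filter (fun p => p.2 == ws)).flatMap (fun p => G p.1)
      = ks.flatMap (fun k => if val k == ws then G k else []) := by
  induction ks with
  | nil => rfl
  | cons k t ih =>
    simp only [List.map_cons, List.filter_cons, List.flatMap_cons]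
    by_cases h : val k == ws
    · simp [h, ih]
    · simp [h, ih]

theorem pvStep_eq (d : PySem.Dict String String) (hnd : d.keys.Nodup) (ws : String)
    (alle : List String) :
    d.keys.foldl (fun resultaat key =>
      if d.getD key "" == ws then
        alle.foldl (fun resultaat zin =>
          if !PySem.Str.isIn key zin then resultaat ++ [key ++ " " ++ zin] else resultaat)
          resultaat
      else resultaat) []
    = pvStepB d alle ws := by
  have h1 : d.keys.foldl (fun resultaat key =>
      if d.getD key "" == ws then
        alle.foldl (fun resultaat zin =>
          if !PySem.Str.isIn key zin then resultaat ++ [key ++ " " ++ zin] else resultaat)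
          resultaat
      else resultaat) []
      = d.keys.foldl (fun resultaat key =>
          resultaat ++ (if d.getD key "" == ws then
            (alle.filter (fun zin => !PySem.Str.isIn key zin)).map
              (fun zin => key ++ " " ++ zin) else [])) [] := by
    apply PySem.List.foldl_congr_mem
    intro acc key _
    by_cases h : d.getD key "" == ws
    · simp only [h, if_true, PySem.List.foldl_append_if]
    · simp [h]
  rw [h1, PySem.List.foldl_append_eq_flatMap, List.nil_append]
  unfold pvStepB
  rw [PySem.Dict.items_eq_map_keys d hnd ""]
  exact (pvFlatMap_if d.keys (fun k => d.getD k "") ws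
    (fun key => (alle.filter (fun zin => !PySem.Str.isIn key zin)).map
      (fun zin => key ++ " " ++ zin))).symm

theorem pvMain (woordenDict : List (String × String)) (zinSkelet : List String) :
    genereerZinnenZonderDubbels woordenDict zinSkelet
      = zinSkelet.reverse.foldl (pvStepB (PySem.Dict.ofList woordenDict)) ["."] := by
  induction zinSkelet with
  | nil => rfl
  | cons ws t ih =>
    have hnd : (PySem.Dict.ofList woordenDict).keys.Nodup :=
      PySem.Dict.nodup_keys_ofList woordenDict
    show (let alleZinnen := genereerZinnenZonderDubbels woordenDict t
          let d := PySem.Dict.ofList woordenDict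
          d.keys.foldl (fun resultaat key =>
            if d.getD key "" == ws then
              alleZinnen.foldl (fun resultaat zin =>
                if !PySem.Str.isIn key zin then resultaat ++ [key ++ " " ++ zin] else resultaat)
                resultaat
            else resultaat) []) = _
    simp only [List.reverse_cons, List.foldl_append, List.foldl_cons, List.foldl_nil]
    rw [← ih]
    exact pvStep_eq _ hnd ws _

-- ===== VERDICT (by name: the statement is the Claim_ definition above) =====
theorem genereerZinnenZonderDubbels_spec : Claim_equal_genereerZinnenZonderDubbels := by
  intro woordenDict zinSkelet _
  unfold Spec_genereerZinnenZonderDubbels genereerZinnenZonderDubbels_alt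
  exact pvMain woordenDict zinSkelet
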